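-- pv_equiv track=rewrite | github.com/consolelogreece/Coding-Challenges | Codewars/Python/3 Kyu/Base64 Encoding.py | convert_char_to_six_bit_binary
-- ===== SOURCE A (Python) =====
-- def convert_char_to_six_bit_binary(string):
--
--     decimalbinstring = ""
--     decimalbinarray = []
--     for char in string:
--         # Convert each character (ASCII) into its binary form,
--         # and add them into the array in groups of 3 (3 x 8 bin ints).
--         # use zfill to keep each integer 8 bits long
--         decimalbinstring += (bin(ord(char))[2:]).zfill(8)
--
--     decimalbinstring_len = len(decimalbinstring)  # stores length of the binary string for future use.
--
--     remainder = decimalbinstring_len % 6  # calculates remainder. this is needed for padding.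
--
--     for i in range(decimalbinstring_len)[:-5:6]:
--         # loops through the string of binary, and splits them up into strings of length 6, and appends those to array.
--         decimalbinarray.append(
--             decimalbinstring[i] + decimalbinstring[i + 1] + decimalbinstring[i + 2] + decimalbinstring[i + 3] +
--             decimalbinstring[i + 4] + decimalbinstring[i + 5])
--
--     if remainder != 0:
--         # if remainder doesn't equal 0, padding is necessary.
--         tempstring = ""
--
--         for i in range((decimalbinstring_len - remainder), decimalbinstring_len):
--             tempstring += decimalbinstring[i]
--         tempstring += ("0" * (6 - remainder))  # pads the remaining decimals with zeros. i.e. '01' becomes '010000'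
--         decimalbinarray.append(tempstring)
--
--     return decimalbinarray
-- ===== SOURCE B (Python) =====
-- def convert_char_to_six_bit_binary(string):
--     # One pass: keep a running bit buffer, drain 6-bit chunks as soon as available.
--     out = []
--     buf = ""
--     for ch in string:
--         buf += bin(ord(ch))[2:].zfill(8)
--         while len(buf) >= 6:
--             out.append(buf[:6])
--             buf = buf[6:]
--     if buf:
--         out.append(buf + "0" * (6 - len(buf)))
--     return out
-- ===== Notes on version B (the rewrite author's own statement) =====
-- stated objective: alternative
-- what changed: A builds the full bit string first and then slices it by a strided index range plus a separate remainder loop; B makes a single pass that appends each character's 8 bits to a running buffer and greedily drains 6-bit chunks as they become available, padding the tail once at the end.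
import Mathlib
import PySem

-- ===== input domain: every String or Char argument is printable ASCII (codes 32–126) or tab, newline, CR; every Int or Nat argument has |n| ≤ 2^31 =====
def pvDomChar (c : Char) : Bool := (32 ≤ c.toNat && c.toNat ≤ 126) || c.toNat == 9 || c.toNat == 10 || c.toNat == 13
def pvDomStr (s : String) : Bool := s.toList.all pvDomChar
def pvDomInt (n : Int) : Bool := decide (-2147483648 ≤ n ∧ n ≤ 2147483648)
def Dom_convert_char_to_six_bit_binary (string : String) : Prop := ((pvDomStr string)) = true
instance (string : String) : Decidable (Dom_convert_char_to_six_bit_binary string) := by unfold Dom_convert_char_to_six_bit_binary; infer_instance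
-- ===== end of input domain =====

-- B fuses A's build-then-slice two-pass structure into a single pass draining a 6-bit buffer (alternative decomposition, same cost).

-- ===== PORT A =====
-- bin(n)[2:] for n ≥ 0: binary digits, MSB first ('0' for n = 0)
def pyBinDigits (n : Nat) : List Char :=
  if h : n = 0 then [] else pyBinDigits (n / 2) ++ [if n % 2 = 1 then '1' else '0']
decreasing_by exact Nat.div_lt_self (Nat.pos_of_ne_zero h) (by omega)

def pyBin (n : Nat) : List Char := if n = 0 then ['0'] else pyBinDigits n

-- s.zfill(8) on a digit string
def pyZfill8 (l : List Char) : List Char := List.replicate (8 - l.length) '0' ++ l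

def convert_char_to_six_bit_binary (string : String) : List String :=
  let bits : List Char :=
    string.toList.foldl (fun acc c => acc ++ pyZfill8 (pyBin c.toNat)) []
  let L : Int := bits.length
  let r : Int := PySem.Int.mod L 6
  -- range(L)[:-5:6] is range(0, L-5, 6); exact here since L = len(bits) ≥ 0
  let idxs := PySem.List.pyRange 0 (L - 5) 6
  let arr := idxs.foldl (fun acc i => acc ++
      [String.ofList [PySem.List.pyGetD bits i ' ', PySem.List.pyGetD bits (i+1) ' ',
                  PySem.List.pyGetD bits (i+2) ' ', PySem.List.pyGetD bits (i+3) ' ',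
                  PySem.List.pyGetD bits (i+4) ' ', PySem.List.pyGetD bits (i+5) ' ']]) []
      -- pyGetD: every index 0 ≤ i, i+5 ≤ L-1 is in range, so this is exactly Python's s[i]
  if r ≠ 0 then
    let temp := (PySem.List.pyRange (L - r) L 1).foldl
        (fun acc i => acc ++ [PySem.List.pyGetD bits i ' ']) []
    arr ++ [String.ofList (temp ++ List.replicate (6 - r).toNat '0')]
  else arr

-- ===== PORT B =====
-- the 'while len(buf) >= 6' drain loop: buf[:6] / buf[6:] are take/drop (length ≥ 6)
def drainB (buf : List Char) (out : List String) : List String × List Char :=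
  if h : 6 ≤ buf.length then
    drainB (buf.drop 6) (out ++ [String.ofList (buf.take 6)])
  else (out, buf)
termination_by buf.length
decreasing_by simp; omega

-- the 'for ch in string' loop with the final tail padding
def loopB : List Char → List Char → List String → List String
  | [], buf, out =>
      if buf.isEmpty then out
      else out ++ [String.ofList (buf ++ List.replicate (6 - buf.length) '0')]
  | c :: cs, buf, out =>
      let p := drainB (buf ++ pyZfill8 (pyBin c.toNat)) out
      loopB cs p.2 p.1

def convert_char_to_six_bit_binary_alt (string : String) : List String :=
  loopB string.toList [] []

-- ===== PRECONDITION & SPEC =====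
def Spec_convert_char_to_six_bit_binary (string : String) (out : List String) : Prop := out = convert_char_to_six_bit_binary_alt string
instance (string : String) (out : List String) : Decidable (Spec_convert_char_to_six_bit_binary string out) := by unfold Spec_convert_char_to_six_bit_binary; infer_instance

-- ===== CLAIM (what is proved, stated in full; the proofs are below) =====
def Claim_equal_convert_char_to_six_bit_binary : Prop := ∀ (string : String), Dom_convert_char_to_six_bit_binary string → Spec_convert_char_to_six_bit_binary string (convert_char_to_six_bit_binary string)

-- ===== LEMMAS AND PROOFS =====

-- canonical greedy 6-chunking: (full 6-char chunks, leftover of length < 6)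
def chunks (bits : List Char) : List String × List Char :=
  if h : 6 ≤ bits.length then
    (String.ofList (bits.take 6) :: (chunks (bits.drop 6)).1, (chunks (bits.drop 6)).2)
  else ([], bits)
termination_by bits.length
decreasing_by simp; omega

def finalize (bits : List Char) : List String :=
  (chunks bits).1 ++
    (if (chunks bits).2 = [] then []
     else [String.ofList ((chunks bits).2 ++ List.replicate (6 - (chunks bits).2.length) '0')])

theorem chunks_pos (bits : List Char) (h : 6 ≤ bits.length) :
    chunks bits = (String.ofList (bits.take 6) :: (chunks (bits.drop 6)).1, (chunks (bits.drop 6)).2) := by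
  rw [chunks]; simp [h]

theorem chunks_snd (bits : List Char) :
    (chunks bits).2 = bits.drop (bits.length - bits.length % 6) := by
  fun_induction chunks bits with
  | case1 bits h ih =>
    simp only
    rw [ih, List.drop_drop, List.length_drop]
    congr 1
    omega
  | case2 bits h =>
    simp only
    rw [Nat.sub_eq_zero_of_le (by omega), List.drop_zero]

theorem chunks_snd_len (bits : List Char) : (chunks bits).2.length < 6 := by
  rw [chunks_snd, List.length_drop]; omega

theorem chunks_small (bits : List Char) (h : ¬ 6 ≤ bits.length) :
    chunks bits = ([], bits) := by
  rw [chunks]; simp [h]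

theorem chunks_append (xs ys : List Char) :
    chunks (xs ++ ys) =
      ((chunks xs).1 ++ (chunks ((chunks xs).2 ++ ys)).1,
       (chunks ((chunks xs).2 ++ ys)).2) := by
  fun_induction chunks xs with
  | case1 xs h ih =>
    rw [chunks_pos (xs ++ ys) (by simp; omega)]
    rw [List.take_append_of_le_length (by omega), List.drop_append_of_le_length (by omega)]
    rw [ih]
    simp
  | case2 xs h =>
    simp

theorem drainB_eq (buf : List Char) (out : List String) :
    drainB buf out = (out ++ (chunks buf).1, (chunks buf).2) := by
  fun_induction drainB buf out with
  | case1 buf out h ih =>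
    rw [ih, chunks_pos buf h]
    simp
  | case2 buf out h =>
    rw [chunks_small buf h]
    simp

theorem loopB_eq (cs : List Char) (buf : List Char) (out : List String)
    (hb : buf.length < 6) :
    loopB cs buf out = out ++ finalize (buf ++ cs.flatMap (fun c => pyZfill8 (pyBin c.toNat))) := by
  induction cs generalizing buf out with
  | nil =>
    simp only [loopB, List.flatMap_nil, List.append_nil, finalize,
      chunks_small buf (by omega)]
    cases buf <;> simp
  | cons c cs ih =>
    simp only [loopB, drainB_eq]
    rw [ih _ _ (chunks_snd_len _)]
    have key : finalize (buf ++ (pyZfill8 (pyBin c.toNat) ++ cs.flatMap (fun c => pyZfill8 (pyBin c.toNat))))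
        = (chunks (buf ++ pyZfill8 (pyBin c.toNat))).1 ++
          finalize ((chunks (buf ++ pyZfill8 (pyBin c.toNat))).2 ++ cs.flatMap (fun c => pyZfill8 (pyBin c.toNat))) := by
      rw [← List.append_assoc, finalize, finalize,
        chunks_append (buf ++ pyZfill8 (pyBin c.toNat)) (cs.flatMap (fun c => pyZfill8 (pyBin c.toNat)))]
      simp
    rw [List.flatMap_cons, key, List.append_assoc]

-- six explicit indexed chars are (drop m).take 6
theorem take6_explicit (l : List Char) (m : Nat) (h : m + 6 ≤ l.length) :
    (l.drop m).take 6 = [l[m], l[m+1], l[m+2], l[m+3], l[m+4], l[m+5]] := by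
  apply List.ext_getElem
  · simp; omega
  · intro i h1 h2
    simp only [List.length_take, List.length_drop] at h1
    have hi : i < 6 := by omega
    interval_cases i <;> simp [List.getElem_take, List.getElem_drop] <;> congr 1

theorem map_range_chunks (bits : List Char) :
    (List.range (bits.length / 6)).map
        (fun k => String.ofList ((bits.drop (6 * k)).take 6)) = (chunks bits).1 := by
  fun_induction chunks bits with
  | case1 bits h ih =>
    simp only
    have hq : bits.length / 6 = (bits.length - 6) / 6 + 1 := by omega
    rw [hq, List.range_succ_eq_map, List.map_cons, List.map_map]
    simp only [Nat.mul_zero, List.drop_zero]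
    congr 1
    rw [List.length_drop] at ih
    rw [← ih]
    apply List.map_congr_left
    intro k _
    simp only [Function.comp]
    rw [List.drop_drop, show 6 * Nat.succ k = 6 + 6 * k by omega]
  | case2 bits h =>
    rw [Nat.div_eq_of_lt (by omega)]
    simp

-- A's strided chunk loop equals the greedy full chunks
theorem arr_eq (bits : List Char) :
    (PySem.List.pyRange 0 ((bits.length : Int) - 5) 6).foldl (fun acc i => acc ++
      [String.ofList [PySem.List.pyGetD bits i ' ', PySem.List.pyGetD bits (i+1) ' ',
                  PySem.List.pyGetD bits (i+2) ' ', PySem.List.pyGetD bits (i+3) ' ',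
                  PySem.List.pyGetD bits (i+4) ' ', PySem.List.pyGetD bits (i+5) ' ']]) []
    = (chunks bits).1 := by
  rw [PySem.List.foldl_append_singleton_eq_map, List.nil_append]
  rw [PySem.List.pyRange_of_pos 0 ((bits.length : Int) - 5) (by omega)]
  have hq : (if (0:Int) < (bits.length : Int) - 5 then
      (((bits.length : Int) - 5 - 0 + 6 - 1) / 6).toNat else 0) = bits.length / 6 := by
    split_ifs with h
    · omega
    · omega
  rw [hq, List.map_map, ← map_range_chunks]
  apply List.map_congr_left
  intro k hk
  simp only [List.mem_range] at hk
  have hk6 : 6 * k + 6 ≤ bits.length := by omega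
  simp only [Function.comp, Int.zero_add]
  rw [take6_explicit bits (6 * k) hk6]
  congr 1
  simp only [List.cons.injEq, and_true]
  refine ⟨?_, ?_, ?_, ?_, ?_, ?_⟩ <;>
    (rw [PySem.List.pyGetD_eq_getElem bits ' ' (by omega) (by omega)]
     congr 1)

theorem A_eq_finalize (bits : List Char) :
    (let L : Int := bits.length
     let r : Int := PySem.Int.mod L 6
     let idxs := PySem.List.pyRange 0 (L - 5) 6
     let arr := idxs.foldl (fun acc i => acc ++
        [String.ofList [PySem.List.pyGetD bits i ' ', PySem.List.pyGetD bits (i+1) ' ',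
                    PySem.List.pyGetD bits (i+2) ' ', PySem.List.pyGetD bits (i+3) ' ',
                    PySem.List.pyGetD bits (i+4) ' ', PySem.List.pyGetD bits (i+5) ' ']]) []
     if r ≠ 0 then
       let temp := (PySem.List.pyRange (L - r) L 1).foldl
          (fun acc i => acc ++ [PySem.List.pyGetD bits i ' ']) []
       arr ++ [String.ofList (temp ++ List.replicate (6 - r).toNat '0')]
     else arr) = finalize bits := by
  simp only
  have hr : PySem.Int.mod (bits.length : Int) 6 = ((bits.length % 6 : Nat) : Int) := by
    rw [PySem.Int.mod_eq_emod_of_pos (by omega)]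
    omega
  rw [hr, arr_eq]
  have hsnd := chunks_snd bits
  have hslen : (chunks bits).2.length = bits.length % 6 := by
    rw [hsnd, List.length_drop]; omega
  by_cases h0 : bits.length % 6 = 0
  · rw [if_neg (by omega)]
    have : (chunks bits).2 = [] := by
      rw [← List.length_eq_zero_iff, hslen, h0]
    simp [finalize, this]
  · rw [if_pos (by omega)]
    rw [PySem.List.foldl_append_singleton_eq_map, List.nil_append]
    have hcast : ((bits.length : Int) - ((bits.length % 6 : Nat) : Int)) =
        (((bits.length - bits.length % 6 : Nat) : Int)) := by push_cast; omega
    have hmap : (PySem.List.pyRange ((bits.length : Int) - ((bits.length % 6 : Nat) : Int)) (bits.length : Int) 1).map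
        (fun i => PySem.List.pyGetD bits i ' ') = bits.drop (bits.length - bits.length % 6) := by
      rw [hcast]
      have := PySem.List.map_pyGetD_pyRange bits ' '
        (a := ((bits.length - bits.length % 6 : Nat) : Int)) (by positivity)
      simp only [PySem.List.len] at this ⊢
      rw [this, Int.toNat_natCast]
    rw [hmap, ← hsnd]
    have hne : (chunks bits).2 ≠ [] := by
      intro hc; rw [hc] at hslen; simp at hslen; omega
    rw [finalize, if_neg hne, hslen,
      show ((6:Int) - ((bits.length % 6 : Nat) : Int)).toNat = 6 - bits.length % 6 from by omega]

-- ===== VERDICT (by name: the statement is the Claim_ definition above) =====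
theorem convert_char_to_six_bit_binary_spec : Claim_equal_convert_char_to_six_bit_binary := by
  intro s _
  unfold Spec_convert_char_to_six_bit_binary convert_char_to_six_bit_binary convert_char_to_six_bit_binary_alt
  rw [PySem.List.foldl_append_eq_flatMap, List.nil_append]
  rw [loopB_eq s.toList [] [] (by simp), List.nil_append, List.nil_append]
  exact A_eq_finalize _
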